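-- pv_equiv track=rewrite | github.com/pypi-data/pypi-mirror-124 | packages/String-Extract/String-Extract-1.0.1.tar.gz/String-Extract-1.0.1/string_extract/__init__.py | links
-- ===== SOURCE A (Python) =====
-- def links(string):
--     total = []
--     https = string.split("https://")
--     for i in https:
--         set = i.split("http://")
--         for subset in set:
--             total.append(subset)
--     return len(total) - 1
-- ===== SOURCE B (Python) =====
-- def links(string):
--     return string.count("https://") + string.count("http://")
-- ===== Notes on version B (the rewrite author's own statement) =====
-- stated objective: simpler
-- what changed: Replaces the double split (by 'https://' then 'http://') and the accumulated list of all fragments with two direct str.count calls summed, relying on the fact that neither pattern can straddle an occurrence of the other.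
import Mathlib
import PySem

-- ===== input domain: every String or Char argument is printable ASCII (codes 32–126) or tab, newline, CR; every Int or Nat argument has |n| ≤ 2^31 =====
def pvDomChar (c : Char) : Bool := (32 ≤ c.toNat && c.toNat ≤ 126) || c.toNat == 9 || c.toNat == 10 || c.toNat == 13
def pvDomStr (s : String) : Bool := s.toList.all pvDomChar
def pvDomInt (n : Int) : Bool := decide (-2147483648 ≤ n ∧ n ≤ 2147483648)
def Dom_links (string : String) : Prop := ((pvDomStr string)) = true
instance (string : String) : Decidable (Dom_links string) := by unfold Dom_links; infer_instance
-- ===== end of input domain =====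

-- B replaces A's double split and fragment list by two direct substring counts (simpler; return value only).

-- ===== PORT A =====
def links (string : String) : Int :=
  let total : List (List Char) := []
  let https := PySem.Chars.splitOn string.toList "https://".toList
  let total := https.foldl (fun total i =>
    let set := PySem.Chars.splitOn i "http://".toList
    set.foldl (fun total subset => total ++ [subset]) total) total
  PySem.List.len total - 1

-- ===== PORT B =====
def links_alt (string : String) : Int :=
  (PySem.Str.count string "https://" : Int) + (PySem.Str.count string "http://" : Int)

-- ===== PRECONDITION & SPEC =====
def Spec_links (string : String) (out : Int) : Prop := out = links_alt string
instance (string : String) (out : Int) : Decidable (Spec_links string out) := by unfold Spec_links; infer_instance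

-- ===== CLAIM (what is proved, stated in full; the proofs are below) =====
def Claim_equal_links : Prop := ∀ (string : String), Dom_links string → Spec_links string (links string)

-- ===== LEMMAS AND PROOFS =====

-- the two separator patterns as plain character lists
theorem h7_eq : "http://".toList = ['h','t','t','p',':','/','/'] := rfl
theorem h8_eq : "https://".toList = ['h','t','t','p','s',':','/','/'] := rfl

-- equation shapes for the fuelled PySem scanners
theorem cgo_zero (sub l : List Char) (a : Nat) : PySem.Chars.count.go sub 0 l a = a := by
  cases l <;> simp [PySem.Chars.count.go]

theorem cgo_nil (sub : List Char) (fuel a : Nat) : PySem.Chars.count.go sub fuel [] a = a := by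
  cases fuel <;> simp [PySem.Chars.count.go]

theorem cgo_cons (sub : List Char) (fuel a : Nat) (c : Char) (t : List Char) :
    PySem.Chars.count.go sub (fuel+1) (c::t) a =
      if sub.isPrefixOf (c::t) then PySem.Chars.count.go sub fuel (List.drop sub.length (c::t)) (a+1)
      else PySem.Chars.count.go sub fuel t a := by
  simp [PySem.Chars.count.go]

theorem sgo_end (sub : List Char) (fuel : Nat) (cur : List Char) (acc : List (List Char)) :
    PySem.Chars.splitOn.go sub fuel [] cur acc = (cur.reverse :: acc).reverse := by
  cases fuel <;> simp [PySem.Chars.splitOn.go]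

theorem sgo_cons (sub : List Char) (fuel : Nat) (c : Char) (t cur : List Char) (acc : List (List Char)) :
    PySem.Chars.splitOn.go sub (fuel+1) (c::t) cur acc =
      if sub.isPrefixOf (c::t) then
        PySem.Chars.splitOn.go sub fuel (List.drop sub.length (c::t)) [] (cur.reverse :: acc)
      else PySem.Chars.splitOn.go sub fuel t (c::cur) acc := by
  simp [PySem.Chars.splitOn.go]

-- the accumulator of count.go is additive
theorem cgo_acc (sub : List Char) (fuel : Nat) (l : List Char) (a : Nat) :
    PySem.Chars.count.go sub fuel l a = a + PySem.Chars.count.go sub fuel l 0 := by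
  induction fuel generalizing l a with
  | zero => simp [cgo_zero]
  | succ fuel ih =>
    cases l with
    | nil => simp [cgo_nil]
    | cons c t =>
      rw [cgo_cons, cgo_cons]
      split
      · rw [ih _ (a+1), ih _ (0+1)]; omega
      · exact ih t a

-- count.go does not depend on the fuel once it covers the string (sub nonempty)
theorem cgo_fuel (sub : List Char) (hs : sub ≠ []) (n : Nat) :
    ∀ (l : List Char), l.length ≤ n → ∀ (fuel fuel' a : Nat), l.length ≤ fuel → l.length ≤ fuel' →
      PySem.Chars.count.go sub fuel l a = PySem.Chars.count.go sub fuel' l a := by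
  have hsl : 1 ≤ sub.length := by cases sub <;> simp_all
  induction n with
  | zero =>
    intro l hln fuel fuel' a _ _
    rw [List.length_eq_zero_iff.mp (Nat.le_zero.mp hln), cgo_nil, cgo_nil]
  | succ n ih =>
    intro l hln fuel fuel' a h1 h2
    cases l with
    | nil => rw [cgo_nil, cgo_nil]
    | cons c t =>
      simp only [List.length_cons] at hln h1 h2
      obtain ⟨f, rfl⟩ : ∃ f, fuel = f + 1 := ⟨fuel - 1, by omega⟩
      obtain ⟨f', rfl⟩ : ∃ f', fuel' = f' + 1 := ⟨fuel' - 1, by omega⟩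
      rw [cgo_cons, cgo_cons]
      split
      · have hd : (List.drop sub.length (c::t)).length ≤ t.length := by simp; omega
        exact ih _ (by omega) f f' (a+1) (by omega) (by omega)
      · exact ih t (by omega) f f' a (by omega) (by omega)

theorem count_eq_go (sub l : List Char) (hs : sub ≠ []) :
    PySem.Chars.count l sub = PySem.Chars.count.go sub l.length l 0 := by
  simp [PySem.Chars.count, hs]

theorem cnt_nil (sub : List Char) (hs : sub ≠ []) : PySem.Chars.count [] sub = 0 := by
  rw [count_eq_go _ _ hs]; exact cgo_zero sub [] 0

theorem cnt_nomatch (sub : List Char) (hs : sub ≠ []) (c : Char) (t : List Char)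
    (h : ¬ sub.isPrefixOf (c::t)) : PySem.Chars.count (c::t) sub = PySem.Chars.count t sub := by
  rw [count_eq_go _ _ hs, count_eq_go _ _ hs, show (c::t).length = t.length + 1 by simp, cgo_cons]
  simp [h]

theorem cnt_match (sub l : List Char) (hs : sub ≠ []) (hl : l ≠ []) (h : sub.isPrefixOf l) :
    PySem.Chars.count l sub = PySem.Chars.count (List.drop sub.length l) sub + 1 := by
  cases l with
  | nil => exact absurd rfl hl
  | cons c t =>
    have hsl : 1 ≤ sub.length := by cases sub <;> simp_all
    rw [count_eq_go _ _ hs, count_eq_go _ _ hs, show (c::t).length = t.length + 1 by simp, cgo_cons]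
    simp only [h, if_pos]
    rw [cgo_acc,
        cgo_fuel sub hs t.length _ (by simp; omega) t.length _ 0 (by simp; omega) (le_refl _)]
    omega

-- "http://" cannot straddle an inserted "https://": a prefix occurrence that starts inside x stays in x
theorem noCross (x r : List Char) (hx : x ≠ [])
    (h : List.isPrefixOf ['h','t','t','p',':','/','/'] (x ++ ['h','t','t','p','s',':','/','/'] ++ r)) :
    List.isPrefixOf ['h','t','t','p',':','/','/'] x := by
  have hp : ['h','t','t','p',':','/','/'] <+: (x ++ ['h','t','t','p','s',':','/','/'] ++ r) :=
    (PySem.Chars.startswith_iff _ _).mp h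
  by_cases hlen : 7 ≤ x.length
  · have ht := List.prefix_iff_eq_take.mp hp
    rw [List.append_assoc,
        List.take_append_of_le_length (l₂ := ['h','t','t','p','s',':','/','/'] ++ r) (by simpa using hlen)] at ht
    exact (PySem.Chars.startswith_iff _ _).mpr (List.prefix_iff_eq_take.mpr (by simpa using ht))
  · exfalso
    have hk1 : 1 ≤ x.length := by cases x <;> simp_all
    have ht := List.prefix_iff_eq_take.mp hp
    rw [List.append_assoc, show (['h','t','t','p',':','/','/'] : List Char).length = 7 from rfl,
        List.take_append, List.take_of_length_le (by omega),
        List.take_append_of_le_length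
          (l₁ := (['h','t','t','p','s',':','/','/'] : List Char)) (by simp; omega)] at ht
    have hdrop : List.drop x.length ['h','t','t','p',':','/','/'] =
        List.take (7 - x.length) ['h','t','t','p','s',':','/','/'] := by
      have := congrArg (List.drop x.length) ht
      simpa [List.drop_left] using this
    have h0 : (['h','t','t','p',':','/','/'] : List Char)[x.length]? = some 'h' := by
      have := congrArg (fun l => l[0]?) hdrop
      simp only [List.getElem?_drop, List.getElem?_take, Nat.add_zero] at this
      rw [this]
      simp [show 0 < 7 - x.length by omega]
    have hcase : x.length = 1 ∨ x.length = 2 ∨ x.length = 3 ∨ x.length = 4 ∨ x.length = 5 ∨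
        x.length = 6 := by omega
    rcases hcase with h'|h'|h'|h'|h'|h' <;> rw [h'] at h0 <;> simp at h0

-- counting "http://" distributes over an inserted "https://"
theorem splice (x r : List Char) :
    PySem.Chars.count (x ++ ['h','t','t','p','s',':','/','/'] ++ r) ['h','t','t','p',':','/','/'] =
      PySem.Chars.count x ['h','t','t','p',':','/','/'] +
        PySem.Chars.count r ['h','t','t','p',':','/','/'] := by
  have h7 : (['h','t','t','p',':','/','/'] : List Char) ≠ [] := by decide
  induction hn : x.length using Nat.strong_induction_on generalizing x r with
  | _ n ih =>
  cases x with
  | nil =>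
    show PySem.Chars.count ('h'::'t'::'t'::'p'::'s'::':':: '/'::'/'::r) _ = _
    rw [cnt_nomatch _ h7 _ _ (by simp [List.isPrefixOf]),
        cnt_nomatch _ h7 _ _ (by simp [List.isPrefixOf]),
        cnt_nomatch _ h7 _ _ (by simp [List.isPrefixOf]),
        cnt_nomatch _ h7 _ _ (by simp [List.isPrefixOf]),
        cnt_nomatch _ h7 _ _ (by simp [List.isPrefixOf]),
        cnt_nomatch _ h7 _ _ (by simp [List.isPrefixOf]),
        cnt_nomatch _ h7 _ _ (by simp [List.isPrefixOf]),
        cnt_nomatch _ h7 _ _ (by simp [List.isPrefixOf]),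
        cnt_nil _ h7]
    omega
  | cons c t =>
    by_cases hp : List.isPrefixOf ['h','t','t','p',':','/','/']
        ((c::t) ++ ['h','t','t','p','s',':','/','/'] ++ r)
    · have hpx := noCross (c::t) r (by simp) hp
      have hxlen : 7 ≤ (c::t).length := by
        have := ((PySem.Chars.startswith_iff _ _).mp hpx).length_le
        simpa using this
      rw [cnt_match _ _ h7 (by simp) hp, cnt_match _ _ h7 (by simp) hpx]
      rw [show ((['h','t','t','p',':','/','/'] : List Char).length) = 7 from rfl,
          List.append_assoc, List.drop_append_of_le_length (by simpa using hxlen),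
          ← List.append_assoc]
      rw [ih (List.drop 7 (c::t)).length (by simp only [List.length_cons, List.length_drop] at hn ⊢; omega) _ r rfl]
      omega
    · have hpx : ¬ List.isPrefixOf ['h','t','t','p',':','/','/'] (c::t) := by
        intro hcon
        have hext : (c::t) <+: ((c::t) ++ ['h','t','t','p','s',':','/','/'] ++ r) :=
          ⟨['h','t','t','p','s',':','/','/'] ++ r, by simp⟩
        exact hp ((PySem.Chars.startswith_iff _ _).mpr
          (((PySem.Chars.startswith_iff _ _).mp hcon).trans hext))
      rw [show ((c::t) ++ ['h','t','t','p','s',':','/','/'] ++ r)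
            = c :: (t ++ ['h','t','t','p','s',':','/','/'] ++ r) by simp,
          cnt_nomatch _ h7 _ _ (by simpa using hp), cnt_nomatch _ h7 _ _ hpx]
      exact ih t.length (by simp only [List.length_cons] at hn; omega) t r rfl

-- number of pieces produced by splitOn.go
theorem sgo_len (sub : List Char) (hs : sub ≠ []) (fuel : Nat) (l cur : List Char) (acc : List (List Char))
    (h : l.length ≤ fuel) :
    (PySem.Chars.splitOn.go sub fuel l cur acc).length =
      acc.length + 1 + PySem.Chars.count.go sub fuel l 0 := by
  induction fuel generalizing l cur acc with
  | zero =>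
    rw [List.length_eq_zero_iff.mp (Nat.le_zero.mp h), sgo_end, cgo_zero]; simp
  | succ fuel ih =>
    cases l with
    | nil => rw [sgo_end, cgo_nil]; simp
    | cons c t =>
      have hsl : 1 ≤ sub.length := by cases sub <;> simp_all
      simp only [List.length_cons] at h
      rw [sgo_cons, cgo_cons]
      split
      · rw [ih _ _ _ (by simp; omega), cgo_acc sub fuel _ (0+1)]
        simp; omega
      · rw [ih _ _ _ (by omega)]

theorem splitOn_length (sub l : List Char) (hs : sub ≠ []) :
    (PySem.Chars.splitOn l sub).length = PySem.Chars.count l sub + 1 := by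
  rw [PySem.Chars.splitOn, sgo_len sub hs (l.length+1) l [] [] (by omega),
      cgo_fuel sub hs l.length l (le_refl _) (l.length+1) l.length 0 (by omega) (le_refl _),
      ← count_eq_go _ _ hs]
  simp; omega

-- the "http://" counts of the pieces of a "https://"-split sum to the count of the whole
theorem sgo_sum (fuel : Nat) (l cur : List Char) (acc : List (List Char)) (h : l.length ≤ fuel) :
    ((PySem.Chars.splitOn.go ['h','t','t','p','s',':','/','/'] fuel l cur acc).map
        (fun p => PySem.Chars.count p ['h','t','t','p',':','/','/'])).sum =
      (acc.map (fun p => PySem.Chars.count p ['h','t','t','p',':','/','/'])).sum +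
        PySem.Chars.count (cur.reverse ++ l) ['h','t','t','p',':','/','/'] := by
  induction fuel generalizing l cur acc with
  | zero =>
    rw [List.length_eq_zero_iff.mp (Nat.le_zero.mp h), sgo_end]
    simp [List.sum_reverse]
  | succ fuel ih =>
    cases l with
    | nil => rw [sgo_end]; simp [List.sum_reverse]
    | cons c t =>
      simp only [List.length_cons] at h
      rw [sgo_cons]
      split
      · rename_i hp
        obtain ⟨l', hl'⟩ : ∃ l', (c::t) = ['h','t','t','p','s',':','/','/'] ++ l' := by
          obtain ⟨l', hl'⟩ := (PySem.Chars.startswith_iff _ _).mp hp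
          exact ⟨l', hl'.symm⟩
        have hlen' : (List.drop (['h','t','t','p','s',':','/','/'] : List Char).length (c::t)).length ≤ fuel := by
          simp; omega
        rw [ih _ _ _ hlen']
        simp only [List.map_cons, List.sum_cons, List.reverse_nil, List.nil_append]
        rw [hl', show (List.drop ((['h','t','t','p','s',':','/','/'] : List Char).length)
              (['h','t','t','p','s',':','/','/'] ++ l')) = l' by simp,
            ← List.append_assoc, splice cur.reverse l']
        omega
      · rw [ih _ _ _ (by omega)]
        simp

-- ===== VERDICT (by name: the statement is the Claim_ definition above) =====
theorem links_spec : Claim_equal_links := by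
  intro s _
  unfold Spec_links links links_alt
  have h7 : (['h','t','t','p',':','/','/'] : List Char) ≠ [] := by decide
  have h8 : (['h','t','t','p','s',':','/','/'] : List Char) ≠ [] := by decide
  simp only [PySem.List.foldl_append_singleton, PySem.List.foldl_append_eq_flatMap,
    List.nil_append, PySem.List.len_eq, List.length_flatMap, PySem.Str.count, h7_eq, h8_eq]
  have hsum8 : ∀ l : List (List Char),
      (l.map fun p => (PySem.Chars.splitOn p ['h','t','t','p',':','/','/']).length).sum =
        (l.map fun p => PySem.Chars.count p ['h','t','t','p',':','/','/']).sum + l.length := by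
    intro l
    induction l with
    | nil => simp
    | cons a l ihl =>
      simp only [List.map_cons, List.sum_cons, List.length_cons]
      rw [splitOn_length _ _ h7, ihl]; omega
  have hpieces := sgo_sum (s.toList.length + 1) s.toList [] [] (by omega)
  rw [hsum8,
      show PySem.Chars.splitOn s.toList ['h','t','t','p','s',':','/','/']
        = PySem.Chars.splitOn.go ['h','t','t','p','s',':','/','/'] (s.toList.length+1) s.toList [] []
        from rfl,
      hpieces,
      sgo_len _ h8 _ _ _ _ (by omega : s.toList.length ≤ s.toList.length + 1),
      cgo_fuel _ h8 s.toList.length s.toList (le_refl _) _ s.toList.length 0 (by omega) (le_refl _),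
      ← count_eq_go _ _ h8]
  simp only [List.map_nil, List.sum_nil, List.reverse_nil, List.nil_append, List.length_nil]
  push_cast
  omega
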